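-- pv_equiv track=rewrite | github.com/dirtysalt/codes | contest/leetcode/number-of-squareful-arrays-3.py | numSquarefulPerms
-- ===== SOURCE A (Python) =====
-- from typing import List
--
-- def numSquarefulPerms(A: List[int]) -> int:
--     n = len(A)
--     dp = [[0] * n for _ in range(1 << n)]
--     for i in range(n):
--         dp[1 << i][i] = 1
--
--     # 预先计算i可选的j
--     adj = [[] for i in range(n)]
--     for i in range(n):
--         for j in range(i + 1, n):
--             x = A[i] + A[j]
--             s = int(round(x ** 0.5))
--             if s * s == x:
--                 adj[i].append(j)
--                 adj[j].append(i)
--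
--     for st in range(1 << n):
--         for i in range(n):
--             if not st & (1 << i): continue
--             for j in adj[i]:
--                 if st & (1 << j): continue
--                 dp[st | (1 << j)][j] += dp[st][i]
--     ans = 0
--     for i in range(n):
--         ans += dp[(1 << n) - 1][i]
--
--     fac = [1] * 20
--     for i in range(2, 20):
--         fac[i] = fac[i - 1] * i
--
--     # 比如1出现了3次，那么这3次位置其实都是可以互换的
--     from collections import Counter
--     cnt = Counter(A)
--     for k, c in cnt.items():
--         cn = fac[c]
--         assert ans % cn == 0
--         ans //= cn
--
--     return ans
-- ===== SOURCE B (Python) =====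
-- from typing import List
-- from collections import Counter
--
-- def numSquarefulPerms(A: List[int]) -> int:
--     # DFS over the multiset of values: place elements one by one, iterating only
--     # over distinct values; a branch per distinct value, so duplicates are never
--     # permuted among themselves and no factorial division is needed.
--     cnt = Counter(A)
--
--     def good(x):
--         s = int(round(x ** 0.5))
--         return s * s == x
--
--     def dfs(prev, remaining):
--         if remaining == 0:
--             return 1
--         total = 0
--         for v in cnt:
--             if cnt[v] > 0 and good(prev + v):
--                 cnt[v] -= 1
--                 total += dfs(v, remaining - 1)
--                 cnt[v] += 1
--         return total
--
--     n = len(A)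
--     ans = 0
--     for v in cnt:
--         cnt[v] -= 1
--         ans += dfs(v, n - 1)
--         cnt[v] += 1
--     return ans
-- ===== Notes on version B (the rewrite author's own statement) =====
-- stated objective: faster
-- what changed: Replaces the exhaustive 2^n x n bitmask DP over index subsets plus a final division by the factorials of duplicate multiplicities with a pruned DFS over the Counter of distinct values that counts each distinct permutation exactly once (no table, no division).
import Mathlib
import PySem

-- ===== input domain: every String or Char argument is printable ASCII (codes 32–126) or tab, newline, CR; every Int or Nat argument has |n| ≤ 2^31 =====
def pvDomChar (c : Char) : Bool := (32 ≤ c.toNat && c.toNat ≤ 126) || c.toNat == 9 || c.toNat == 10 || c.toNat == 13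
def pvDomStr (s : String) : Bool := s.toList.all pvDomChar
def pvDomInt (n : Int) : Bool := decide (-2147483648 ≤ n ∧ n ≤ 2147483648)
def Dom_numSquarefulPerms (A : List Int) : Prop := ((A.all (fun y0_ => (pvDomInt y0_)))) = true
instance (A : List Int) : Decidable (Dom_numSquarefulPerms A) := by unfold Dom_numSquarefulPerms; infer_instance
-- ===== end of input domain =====

-- B replaces A's exhaustive 2^n·n bitmask DP (plus a final division by the factorials of
-- duplicate multiplicities) by a pruned DFS over the Counter of distinct values that counts
-- each distinct permutation exactly once (objective: faster).

-- ===== PORT A =====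
-- models `s = int(round(x ** 0.5)); s * s == x`: exact for 0 ≤ x ≤ 2^33 (the only sums Pre_
-- admits; floats are exact there); for x < 0 Python raises TypeError — excluded by Pre_.
def pySq (x : Int) : Bool :=
  let s : Int := (Nat.sqrt x.toNat : Int)
  s * s == x

-- Python's dense arrays dp / adj are modelled as total maps updated pointwise; every index the
-- loops touch is in range, so the update/read pattern is exactly the Python one.
def aAdjStep (A : List Int) (adj : Nat → List Nat) (i : Nat) : Nat → List Nat :=
  (List.range' (i + 1) (A.length - (i + 1))).foldl (fun adj j =>
    let x := A.getD i 0 + A.getD j 0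
    if pySq x then
      let adj' := fun t => if t = i then adj t ++ [j] else adj t
      fun t => if t = j then adj' t ++ [i] else adj' t
    else adj) adj

def aAdj (A : List Int) : Nat → List Nat :=
  (List.range A.length).foldl (aAdjStep A) (fun _ => [])

def aInit (A : List Int) : Nat → Nat → Int :=
  (List.range A.length).foldl (fun dp i => fun st t => if st = 1 <<< i ∧ t = i then 1 else dp st t)
    (fun _ _ => 0)

def aInner (A : List Int) (st : Nat) (dp : Nat → Nat → Int) (i : Nat) : Nat → Nat → Int :=
  if st &&& (1 <<< i) = 0 then dp
  else (aAdj A i).foldl (fun dp j =>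
    if ¬ st &&& (1 <<< j) = 0 then dp
    else fun st' t => if st' = (st ||| (1 <<< j)) ∧ t = j then dp st' t + dp st i else dp st' t) dp

def aMask (A : List Int) (dp : Nat → Nat → Int) (st : Nat) : Nat → Nat → Int :=
  (List.range A.length).foldl (aInner A st) dp

def aDp (A : List Int) : Nat → Nat → Int :=
  (List.range (2 ^ A.length)).foldl (aMask A) (aInit A)

def aFac : List Int :=
  (List.range' 2 18).foldl (fun fac i => fac.set i (fac.getD (i - 1) 0 * (i : Int)))
    (List.replicate 20 (1 : Int))

-- the `assert ans % cn == 0` is a no-op on Pre_ (the divisibility is proved below) and is dropped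
def numSquarefulPerms (A : List Int) : Int :=
  let n := A.length
  let ans := (List.range n).foldl (fun a i => a + aDp A (2 ^ n - 1) i) 0
  (PySem.Dict.counter A).items.foldl
    (fun ans kc => PySem.Int.floordiv ans (PySem.List.pyGetD aFac kc.2 0)) ans

-- ===== PORT B =====
-- the Python `cnt[v] -= 1 … recurse … cnt[v] += 1` is the recursion on the decremented dict
def bDfs (cnt : PySem.Dict Int Int) (prev : Int) : Nat → Int
  | 0 => 1
  | k + 1 =>
    cnt.keys.foldl (fun total v =>
      if 0 < cnt.getD v 0 ∧ pySq (prev + v) then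
        total + bDfs (cnt.modify v 0 (· - 1)) v k
      else total) 0

def numSquarefulPerms_alt (A : List Int) : Int :=
  let cnt := PySem.Dict.counter A
  let n := A.length
  cnt.keys.foldl (fun ans v => ans + bDfs (cnt.modify v 0 (· - 1)) v (n - 1)) 0

-- ===== PRECONDITION & SPEC =====
-- Pre_ excludes exactly the inputs where the Python A raises: a pair of distinct positions whose
-- sum is negative ((-1) ** 0.5 is complex, so round raises TypeError), and a value occurring
-- 20 or more times (fac[c] raises IndexError).
def Pre_numSquarefulPerms (A : List Int) : Prop :=
  A.Pairwise (fun x y => 0 ≤ x + y) ∧ ∀ v ∈ A, A.count v ≤ 19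
instance (A : List Int) : Decidable (Pre_numSquarefulPerms A) := by
  unfold Pre_numSquarefulPerms; infer_instance

def pvWitness_numSquarefulPerms : List Int := [1, 3, 6]

def Spec_numSquarefulPerms (A : List Int) (out : Int) : Prop := out = numSquarefulPerms_alt A
instance (A : List Int) (out : Int) : Decidable (Spec_numSquarefulPerms A out) := by
  unfold Spec_numSquarefulPerms; infer_instance

-- ===== CLAIM (what is proved, stated in full; the proofs are below) =====
def Claim_equal_numSquarefulPerms : Prop :=
  ∀ (A : List Int), Dom_numSquarefulPerms A → Pre_numSquarefulPerms A →
    Spec_numSquarefulPerms A (numSquarefulPerms A)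

-- ===== LEMMAS AND PROOFS =====

-- value at an index (in range wherever used)
def pvVal (A : List Int) (i : Nat) : Int := A.getD i 0

-- number of orderings of the index set s that end in i and whose consecutive value sums pass
-- pySq; fuel = s.card wherever used
def pvDp (A : List Int) : Nat → Finset ℕ → ℕ → ℕ
  | 0, _, _ => 0
  | k + 1, s, i =>
    if s = {i} then 1
    else ∑ l ∈ (s.erase i).filter (fun l => pySq (pvVal A l + pvVal A i)), pvDp A k (s.erase i) l

-- number of squareful orderings of the value multiset m continuing after prev; fuel = card m
def pvH : Nat → Multiset Int → Int → ℕ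
  | 0, _, _ => 1
  | k + 1, m, p => ∑ v ∈ m.toFinset.filter (fun v => pySq (p + v)), pvH k (m.erase v) v

def pvMset (n st : Nat) : Finset ℕ := (Finset.range n).filter (fun i => st.testBit i)
def pvCnt (A : List Int) (s : Finset ℕ) (v : Int) : ℕ := (s.filter (fun i => pvVal A i = v)).card
def pvF (A : List Int) (s : Finset ℕ) : ℕ := ∏ v ∈ s.image (pvVal A), (pvCnt A s v).factorial
def pvMval (A : List Int) (s : Finset ℕ) : Multiset Int := s.val.map (pvVal A)

lemma pySq_comm (a b : Int) : pySq (a + b) = pySq (b + a) := by rw [add_comm]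

-- ---- bit toolkit ----
lemma pvBand_eq_zero (m i : Nat) : m &&& (1 <<< i) = 0 ↔ m.testBit i = false := by
  rw [Nat.shiftLeft_eq, one_mul, Nat.and_two_pow]
  constructor
  · intro h; rcases Bool.eq_false_or_eq_true (m.testBit i) with h1 | h1 <;> simp_all
  · intro h; simp [h]
lemma pvOr_testBit (m i j : Nat) : (m ||| (1 <<< i)).testBit j = (m.testBit j || decide (j = i)) := by
  simp [Nat.testBit_or, Nat.shiftLeft_eq, Nat.testBit_two_pow, eq_comm]
lemma pvXor_testBit_self (st t : Nat) : (st ^^^ (1 <<< t)).testBit t = !st.testBit t := by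
  simp [Nat.testBit_xor, Nat.shiftLeft_eq]

lemma pvXor_testBit_ne (st t j : Nat) (hj : t ≠ j) :
    (st ^^^ (1 <<< t)).testBit j = st.testBit j := by
  simp [Nat.testBit_xor, Nat.shiftLeft_eq, hj]

lemma pvOr_ne (m i : Nat) (h : m.testBit i = false) : m ||| (1 <<< i) ≠ m := by
  intro he
  have : (m ||| (1 <<< i)).testBit i = true := by simp [pvOr_testBit]
  rw [he, h] at this; exact Bool.false_ne_true this
lemma pvXor_or (m t : Nat) (h : m.testBit t = false) : (m ||| (1 <<< t)) ^^^ (1 <<< t) = m := by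
  apply Nat.eq_of_testBit_eq; intro j
  by_cases hj : t = j
  · subst hj; rw [pvXor_testBit_self]; simp [pvOr_testBit, h]
  · rw [pvXor_testBit_ne _ _ _ hj, pvOr_testBit]
    simp only [Bool.or_eq_left_iff_imp, decide_eq_true_eq]
    exact fun hh => absurd hh.symm hj
lemma pvXor_form (st t : Nat) (h : st.testBit t = true) :
    st = (st ^^^ (1 <<< t)) ||| (1 <<< t) ∧ (st ^^^ (1 <<< t)).testBit t = false ∧
      st ^^^ (1 <<< t) < st := by
  refine ⟨?_, by simp [pvXor_testBit_self, h], ?_⟩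
  · apply Nat.eq_of_testBit_eq; intro j
    by_cases hj : t = j
    · subst hj; rw [pvOr_testBit]; simp [h]
    · rw [pvOr_testBit, pvXor_testBit_ne _ _ _ hj]
      symm
      simp only [Bool.or_eq_left_iff_imp, decide_eq_true_eq]
      exact fun hh => absurd hh.symm hj
  · apply Nat.lt_of_testBit t
    · simp [pvXor_testBit_self, h]
    · exact h
    · intro j hj; exact pvXor_testBit_ne _ _ _ (by omega)


lemma pvMset_or (n m t : Nat) (ht : t < n) (h : m.testBit t = false) :
    pvMset n (m ||| (1 <<< t)) = insert t (pvMset n m) := by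
  ext j
  simp only [pvMset, Finset.mem_filter, Finset.mem_range, Finset.mem_insert, pvOr_testBit]
  by_cases hj : j = t
  · subst hj; simp [ht]
  · simp [hj]
lemma pvMset_nonempty (n m : Nat) (hm : m ≠ 0) (hlt : m < 2 ^ n) : pvMset n m ≠ ∅ := by
  intro he
  apply hm
  apply Nat.eq_of_testBit_eq; intro i
  rw [Nat.zero_testBit]
  by_cases hi : i < n
  · by_contra hb
    have : i ∈ pvMset n m := by
      simp [pvMset, Finset.mem_filter, Finset.mem_range, hi]
      exact Bool.of_not_eq_false hb
    rw [he] at this; exact absurd this (Finset.notMem_empty i)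
  · rw [Nat.testBit_lt_two_pow]
    calc m < 2 ^ n := hlt
      _ ≤ 2 ^ i := Nat.pow_le_pow_right (by norm_num) (by omega)
lemma pvMset_singleton (n i : Nat) (hi : i < n) : pvMset n (1 <<< i) = {i} := by
  ext j
  simp only [pvMset, Finset.mem_filter, Finset.mem_range, Finset.mem_singleton,
    Nat.shiftLeft_eq, one_mul, Nat.testBit_two_pow]
  constructor
  · rintro ⟨_, h⟩; exact (of_decide_eq_true h).symm
  · rintro rfl; simp [hi]
lemma pvMset_full (n : Nat) : pvMset n (2 ^ n - 1) = Finset.range n := by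
  ext j
  simp [pvMset, Nat.testBit_two_pow_sub_one]

-- ---- adjacency characterization ----
lemma pvRange_split (n k : Nat) (h : k ≤ n) :
    List.range n = List.range k ++ List.range' k (n - k) := by
  rw [List.range_eq_range', List.range_eq_range', show n = k + (n - k) by omega,
    ← List.range'_append (s := 0) (m := k) (n := n - k) (step := 1)]
  simp

lemma aAdjStep_inner (A : List Int) (i : Nat) :
    ∀ (l : List Nat), l.Nodup → i ∉ l → ∀ (adj : Nat → List Nat) (t : Nat),
      (l.foldl (fun adj j =>
        let x := A.getD i 0 + A.getD j 0
        if pySq x then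
          let adj' := fun t => if t = i then adj t ++ [j] else adj t
          fun t => if t = j then adj' t ++ [i] else adj' t
        else adj) adj) t =
      if t = i then adj t ++ l.filter (fun j => pySq (pvVal A i + pvVal A j))
      else if t ∈ l ∧ pySq (pvVal A i + pvVal A t) = true then adj t ++ [i]
      else adj t := by
  intro l
  induction l with
  | nil => intro _ _ adj t; simp
  | cons j rest ih =>
    intro hnd hni adj t
    have hji : j ≠ i := fun h => hni (h ▸ List.mem_cons_self)
    have hjr : j ∉ rest := (List.nodup_cons.mp hnd).1
    simp only [List.foldl_cons]
    rw [ih (List.nodup_cons.mp hnd).2 (fun h => hni (List.mem_cons_of_mem _ h))]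
    by_cases ht : t = i
    · subst ht
      by_cases hok : pySq (A[t]?.getD 0 + A[j]?.getD 0)
      · simp [hok, hji.symm, pvVal, List.filter_cons]
      · simp [hok, pvVal, List.filter_cons]
    · by_cases htj : t = j
      · subst htj
        have : t ∉ rest := hjr
        by_cases hok : pySq (A[i]?.getD 0 + A[t]?.getD 0)
        · simp [hok, ht, this, pvVal]
        · simp [hok, ht, this, pvVal]
      · have hmem : (t ∈ j :: rest) = (t ∈ rest) := by simp [htj]
        by_cases hok : pySq (A[i]?.getD 0 + A[j]?.getD 0)
        · simp [hok, ht, htj, hji.symm, hmem, pvVal]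
        · simp [hok, ht, htj, hmem, pvVal]

lemma aAdjStep_eq (A : List Int) (adj : Nat → List Nat) (i : Nat) (hi : i < A.length) (t : Nat) :
    aAdjStep A adj i t =
      if t = i then
        adj t ++ (List.range' (i + 1) (A.length - (i + 1))).filter
          (fun j => pySq (pvVal A i + pvVal A j))
      else if (i < t ∧ t < A.length) ∧ pySq (pvVal A i + pvVal A t) = true then adj t ++ [i]
      else adj t := by
  unfold aAdjStep
  rw [aAdjStep_inner A i _ List.nodup_range' (by simp [List.mem_range'_1])]
  have : (t ∈ List.range' (i + 1) (A.length - (i + 1))) ↔ (i < t ∧ t < A.length) := by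
    rw [List.mem_range'_1]; omega
  by_cases ht : t = i
  · simp [ht]
  · simp only [ht, if_false]
    by_cases hm : i < t ∧ t < A.length
    · simp [this, hm]
    · simp [this, hm]

lemma aAdj_state (A : List Int) :
    ∀ k, k ≤ A.length → ∀ t,
      (List.range k).foldl (aAdjStep A) (fun _ => []) t =
        if t < k then
          (List.range A.length).filter
            (fun j => decide (j ≠ t) && pySq (pvVal A (min t j) + pvVal A (max t j)))
        else if t < A.length then
          (List.range k).filter (fun i => pySq (pvVal A i + pvVal A t))
        else [] := by
  intro k
  induction k with
  | zero => intro _ t; by_cases h : t < A.length <;> simp [h]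
  | succ k ih =>
    intro hk t
    have hkA : k < A.length := hk
    rw [List.range_succ, List.foldl_append, List.foldl_cons, List.foldl_nil]
    rw [aAdjStep_eq A _ k hkA t]
    by_cases htk : t = k
    · subst htk
      rw [ih (by omega) t]
      simp only [lt_irrefl, if_false, if_pos (show t < t + 1 by omega), if_pos hkA]
      rw [pvRange_split A.length t (by omega), List.filter_append,
        show A.length - t = (A.length - (t+1)) + 1 by omega, List.range'_succ, List.filter_cons]
      norm_num
      congr 1
      · apply List.filter_congr
        intro j hj
        have hjt : j < t := List.mem_range.mp hj
        have : min t j = j := by omega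
        have h2 : max t j = t := by omega
        rw [this, h2]
        simp [Nat.ne_of_lt hjt]
      · apply List.filter_congr
        intro j hj
        have hjt : t < j := by have := List.mem_range'_1.mp hj; omega
        have : min t j = t := by omega
        have h2 : max t j = j := by omega
        rw [this, h2]
        simp [Nat.ne_of_gt hjt]
    · rw [ih (by omega) t]
      by_cases htlt : t < k
      · have h1 : t < k + 1 := by omega
        have h2 : ¬ (k < t) := by omega
        simp [htlt, h1, h2, htk]
      · have h1 : ¬ (t < k + 1) := by omega
        by_cases htA : t < A.length
        · have hkt : k < t := by omega
          simp only [htlt, if_false, htA, if_true, h1]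
          by_cases hok : pySq (pvVal A k + pvVal A t)
          · rw [if_neg htk, if_pos ⟨⟨hkt, trivial⟩, hok⟩, List.filter_append, List.filter_cons]
            simp [hok]
          · rw [if_neg htk, if_neg (by simp [hok]), List.filter_append, List.filter_cons]
            simp [hok]
        · simp [htlt, htA, h1, htk]

lemma mem_aAdj (A : List Int) (t j : Nat) :
    j ∈ aAdj A t ↔ (t < A.length ∧ j < A.length ∧ j ≠ t ∧ pySq (pvVal A t + pvVal A j) = true) := by
  unfold aAdj
  rw [aAdj_state A A.length le_rfl t]
  by_cases ht : t < A.length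
  · simp only [ht, if_true, List.mem_filter, List.mem_range, Bool.and_eq_true, decide_eq_true_eq]
    constructor
    · rintro ⟨h1, h2, h3⟩
      refine ⟨trivial, h1, h2, ?_⟩
      rcases Nat.lt_or_ge t j with hlt | hge
      · rwa [show min t j = t by omega, show max t j = j by omega] at h3
      · have hjt : j < t := by omega
        rw [show min t j = j by omega, show max t j = t by omega] at h3
        rw [pySq_comm]; exact h3
    · rintro ⟨_, h1, h2, h3⟩
      refine ⟨h1, h2, ?_⟩
      rcases Nat.lt_or_ge t j with hlt | hge
      · rwa [show min t j = t by omega, show max t j = j by omega]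
      · have hjt : j < t := by omega
        rw [show min t j = j by omega, show max t j = t by omega, pySq_comm]
        exact h3
  · simp [ht]

lemma nodup_aAdj (A : List Int) (t : Nat) : (aAdj A t).Nodup := by
  unfold aAdj
  rw [aAdj_state A A.length le_rfl t]
  by_cases ht : t < A.length
  · simp only [ht, if_true]; exact (List.nodup_range).filter _
  · simp [ht]

-- ---- dp table characterization ----
lemma aInit_state (A : List Int) :
    ∀ (k : ℕ) (st t : Nat),
      ((List.range k).foldl
        (fun dp i => fun st t => if st = 1 <<< i ∧ t = i then 1 else dp st t)
        (fun _ _ => (0 : Int))) st t = if st = 1 <<< t ∧ t < k then 1 else 0 := by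
  intro k
  induction k with
  | zero => intro st t; simp
  | succ k ih =>
    intro st t
    rw [List.range_succ, List.foldl_append, List.foldl_cons, List.foldl_nil]
    by_cases h1 : st = 1 <<< k ∧ t = k
    · rw [if_pos h1, if_pos ⟨h1.2 ▸ h1.1, by omega⟩]
    · rw [if_neg h1, ih st t]
      by_cases htk : t = k
      · subst htk
        have hs : ¬ st = 1 <<< t := fun h => h1 ⟨h, rfl⟩
        simp [hs]
      · simp [show (t < k) ↔ (t < k + 1) by omega]

lemma aInit_eq (A : List Int) (st t : Nat) :
    aInit A st t = if st = 1 <<< t ∧ t < A.length then 1 else 0 := by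
  unfold aInit
  exact aInit_state A A.length st t

lemma pvWriteFold (m i : Nat) :
    ∀ (l : List Nat), l.Nodup → ∀ (dp : Nat → Nat → Int) (st t : Nat),
      (l.foldl (fun dp j =>
        if ¬ m &&& (1 <<< j) = 0 then dp
        else fun st' t => if st' = (m ||| (1 <<< j)) ∧ t = j then dp st' t + dp m i
          else dp st' t) dp) st t
      = dp st t +
        (if st = m ||| (1 <<< t) ∧ m &&& (1 <<< t) = 0 ∧ t ∈ l then dp m i else 0) := by
  intro l
  induction l with
  | nil => intro _ dp st t; simp
  | cons j rest ih =>
    intro hnd dp st t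
    have hjr : j ∉ rest := (List.nodup_cons.mp hnd).1
    simp only [List.foldl_cons]
    by_cases hbj : m &&& (1 <<< j) = 0
    · rw [if_neg (by simpa using hbj)]
      rw [ih (List.nodup_cons.mp hnd).2]
      have hdp1 : (if m = (m ||| (1 <<< j)) ∧ i = j then dp m i + dp m i
          else dp m i) = dp m i := by
        rw [if_neg]
        rintro ⟨he, _⟩
        exact pvOr_ne m j (pvBand_eq_zero m j |>.mp hbj) he.symm
      rw [hdp1]
      by_cases ht : t = j
      · subst ht
        have hmem : t ∉ rest := hjr
        simp only [hmem, and_false, if_false, List.mem_cons, true_or, and_true, add_zero,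
          hbj]
        split_ifs <;> ring
      · have h2 : (if st = (m ||| (1 <<< j)) ∧ t = j then dp st t + dp m i
            else dp st t) = dp st t := by
          rw [if_neg]; rintro ⟨_, he⟩; exact ht he
        rw [h2]
        have hmem : (t ∈ j :: rest) ↔ (t ∈ rest) := by simp [ht]
        simp only [hmem]
    · rw [if_pos (by simpa using hbj)]
      rw [ih (List.nodup_cons.mp hnd).2]
      by_cases ht : t = j
      · subst ht
        have hmem : t ∉ rest := hjr
        simp only [hmem, and_false, if_false, List.mem_cons, true_or, and_true, add_zero]
        have hne : ¬ (st = m ||| (1 <<< t) ∧ m &&& (1 <<< t) = 0) := fun hc => hbj hc.2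
        simp only [hne, if_false]
        ring
      · have hmem : (t ∈ j :: rest) ↔ (t ∈ rest) := by simp [ht]
        simp only [hmem]

lemma aInner_eq (A : List Int) (m i : Nat) (dp : Nat → Nat → Int) (hbit : ¬ m &&& (1 <<< i) = 0)
    (st t : Nat) :
    aInner A m dp i st t = dp st t +
      (if st = m ||| (1 <<< t) ∧ m &&& (1 <<< t) = 0 ∧ t ∈ aAdj A i then dp m i else 0) := by
  unfold aInner
  rw [if_neg hbit]
  exact pvWriteFold m i (aAdj A i) (nodup_aAdj A i) dp st t

lemma aMask_state (A : List Int) (m : Nat) :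
    ∀ (k : ℕ) (dp : Nat → Nat → Int) (st t : Nat),
      ((List.range k).foldl (aInner A m) dp) st t = dp st t +
        (if st = m ||| (1 <<< t) ∧ m &&& (1 <<< t) = 0 then
          ∑ i ∈ (Finset.range k).filter
              (fun i => ¬ m &&& (1 <<< i) = 0 ∧ t ∈ aAdj A i), dp m i
        else 0) := by
  intro k
  induction k with
  | zero => intro dp st t; simp
  | succ k ih =>
    intro dp st t
    rw [List.range_succ, List.foldl_append, List.foldl_cons, List.foldl_nil]
    by_cases hbk : m &&& (1 <<< k) = 0
    · have hid : aInner A m ((List.range k).foldl (aInner A m) dp) k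
          = (List.range k).foldl (aInner A m) dp := by
        unfold aInner; rw [if_pos hbk]
      have hfil : (Finset.range (k+1)).filter (fun i => ¬ m &&& (1 <<< i) = 0 ∧ t ∈ aAdj A i)
          = (Finset.range k).filter (fun i => ¬ m &&& (1 <<< i) = 0 ∧ t ∈ aAdj A i) := by
        rw [Finset.range_add_one, Finset.filter_insert, if_neg (fun hc => hc.1 hbk)]
      rw [hid, ih dp st t, hfil]
    · have hPmk : ((List.range k).foldl (aInner A m) dp) m k = dp m k := by
        rw [ih dp m k, if_neg, add_zero]
        rintro ⟨he, hb⟩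
        exact pvOr_ne m k ((pvBand_eq_zero m k).mp hb) he.symm
      rw [aInner_eq A m k _ hbk st t, ih dp st t, hPmk]
      by_cases hadj : t ∈ aAdj A k
      · have hfil : (Finset.range (k+1)).filter (fun i => ¬ m &&& (1 <<< i) = 0 ∧ t ∈ aAdj A i)
            = insert k ((Finset.range k).filter
                (fun i => ¬ m &&& (1 <<< i) = 0 ∧ t ∈ aAdj A i)) := by
          rw [Finset.range_add_one, Finset.filter_insert, if_pos ⟨hbk, hadj⟩]
        rw [hfil, Finset.sum_insert (by simp)]
        by_cases hst : st = m ||| (1 <<< t) ∧ m &&& (1 <<< t) = 0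
        · have h3 : st = m ||| (1 <<< t) ∧ m &&& (1 <<< t) = 0 ∧ t ∈ aAdj A k :=
            ⟨hst.1, hst.2, hadj⟩
          simp only [if_pos h3, if_pos hst]; ring
        · have h3 : ¬ (st = m ||| (1 <<< t) ∧ m &&& (1 <<< t) = 0 ∧ t ∈ aAdj A k) :=
            fun hc => hst ⟨hc.1, hc.2.1⟩
          simp only [if_neg h3, if_neg hst]; ring
      · have hfil : (Finset.range (k+1)).filter (fun i => ¬ m &&& (1 <<< i) = 0 ∧ t ∈ aAdj A i)
            = (Finset.range k).filter (fun i => ¬ m &&& (1 <<< i) = 0 ∧ t ∈ aAdj A i) := by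
          rw [Finset.range_add_one, Finset.filter_insert, if_neg (fun hc => hadj hc.2)]
        rw [hfil]
        have h3 : ¬ (st = m ||| (1 <<< t) ∧ m &&& (1 <<< t) = 0 ∧ t ∈ aAdj A k) :=
          fun hc => hadj hc.2.2
        by_cases hst : st = m ||| (1 <<< t) ∧ m &&& (1 <<< t) = 0
        · simp only [if_neg h3, if_pos hst]; ring
        · simp only [if_neg h3, if_neg hst]; ring

lemma aMask_eq (A : List Int) (m : Nat) (dp : Nat → Nat → Int) (st t : Nat) :
    aMask A dp m st t = dp st t +
      (if st = m ||| (1 <<< t) ∧ m &&& (1 <<< t) = 0 then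
        ∑ i ∈ (Finset.range A.length).filter
            (fun i => ¬ m &&& (1 <<< i) = 0 ∧ t ∈ aAdj A i), dp m i
      else 0) := by
  unfold aMask
  exact aMask_state A m A.length dp st t

def pvInv (A : List Int) (m : Nat) (dp : Nat → Nat → Int) : Prop :=
  ∀ st, st < 2 ^ A.length → ∀ t, t < A.length →
    dp st t = if st.testBit t then
        (if st = 1 <<< t then 1
         else if st ^^^ (1 <<< t) < m then
           ((pvDp A (pvMset A.length st).card (pvMset A.length st) t : Int)) else 0)
      else 0

lemma pvInv_init (A : List Int) : pvInv A 0 (aInit A) := by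
  intro st hst t htA
  rw [aInit_eq]
  by_cases hs : st = 1 <<< t
  · rw [if_pos ⟨hs, htA⟩]
    have hb : st.testBit t = true := by
      rw [hs, Nat.shiftLeft_eq, one_mul, Nat.testBit_two_pow]; simp
    rw [hb, if_pos rfl, if_pos hs]
  · rw [if_neg (fun hc => hs hc.1)]
    by_cases hb : st.testBit t
    · rw [hb, if_pos rfl, if_neg hs, if_neg (by omega)]
    · rw [Bool.not_eq_true] at hb
      rw [hb]; simp
-- the counting identity: the contributions a freshly completed cell receives are exactly
-- the recursion defining pvDp
lemma pvDp_insert (A : List Int) (m t : Nat) (hm : m ≠ 0) (hmlt : m < 2 ^ A.length)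
    (htA : t < A.length) (hbt : m.testBit t = false) :
    ∑ i ∈ (Finset.range A.length).filter
        (fun i => ¬ m &&& (1 <<< i) = 0 ∧ t ∈ aAdj A i),
      pvDp A (pvMset A.length m).card (pvMset A.length m) i
    = pvDp A (insert t (pvMset A.length m)).card (insert t (pvMset A.length m)) t := by
  have htS : t ∉ pvMset A.length m := by
    simp [pvMset, hbt]
  rw [Finset.card_insert_of_notMem htS]
  have hS : pvMset A.length m ≠ ∅ := pvMset_nonempty A.length m hm hmlt
  have hsing : ¬ insert t (pvMset A.length m) = {t} := by
    intro he
    apply hS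
    ext x
    simp only [Finset.notMem_empty, iff_false]
    intro hx
    have : x ∈ insert t (pvMset A.length m) := Finset.mem_insert_of_mem hx
    rw [he, Finset.mem_singleton] at this
    subst this; exact htS hx
  rw [show pvDp A ((pvMset A.length m).card + 1) (insert t (pvMset A.length m)) t
      = if insert t (pvMset A.length m) = {t} then 1
        else ∑ l ∈ ((insert t (pvMset A.length m)).erase t).filter
            (fun l => pySq (pvVal A l + pvVal A t)),
          pvDp A (pvMset A.length m).card ((insert t (pvMset A.length m)).erase t) l from rfl]
  rw [if_neg hsing, Finset.erase_insert htS]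
  apply Finset.sum_congr
  · ext i
    simp only [Finset.mem_filter, Finset.mem_range, mem_aAdj, pvMset]
    constructor
    · rintro ⟨hin, hb, _, _, _, hsq⟩
      refine ⟨⟨hin, ?_⟩, hsq⟩
      rcases Bool.eq_false_or_eq_true (m.testBit i) with h1 | h1
      · exact h1
      · exact absurd ((pvBand_eq_zero m i).mpr h1) hb
    · rintro ⟨⟨hin, hb⟩, hsq⟩
      have hne : t ≠ i := by
        intro he; rw [← he] at hb; rw [hbt] at hb; exact Bool.false_ne_true hb
      exact ⟨hin, fun hz => by rw [(pvBand_eq_zero m i).mp hz] at hb; exact Bool.false_ne_true hb,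
        hin, htA, hne, hsq⟩
  · intro l hl; rfl

lemma pvInv_step (A : List Int) (m : Nat) (dp : Nat → Nat → Int) (h : pvInv A m dp)
    (hm : m < 2 ^ A.length) : pvInv A (m + 1) (aMask A dp m) := by
  intro st hst t htA
  rw [aMask_eq]
  by_cases hcell : st = m ||| (1 <<< t) ∧ m &&& (1 <<< t) = 0
  · obtain ⟨hstEq, hbt0⟩ := hcell
    have hbt : m.testBit t = false := (pvBand_eq_zero m t).mp hbt0
    have hsttb : st.testBit t = true := by rw [hstEq, pvOr_testBit]; simp
    have hxor : st ^^^ (1 <<< t) = m := by rw [hstEq]; exact pvXor_or m t hbt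
    rw [if_pos ⟨hstEq, hbt0⟩]
    by_cases hm0 : m = 0
    · subst hm0
      have hsing : st = 1 <<< t := by rw [hstEq, Nat.zero_or]
      have hfil : (Finset.range A.length).filter
          (fun i => ¬ (0 : Nat) &&& (1 <<< i) = 0 ∧ t ∈ aAdj A i) = ∅ := by
        apply Finset.filter_false_of_mem
        intro i _
        simp [Nat.zero_and]
      rw [hfil, Finset.sum_empty, add_zero, h st hst t htA, hsttb, if_pos rfl, if_pos hsing,
        if_pos rfl, if_pos hsing]
    · have hsing : st ≠ 1 <<< t := by
        intro he
        apply hm0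
        rw [← hxor, he, Nat.xor_self]
      have hmub : (pvMset A.length st) = insert t (pvMset A.length m) := by
        rw [hstEq]; exact pvMset_or A.length m t htA hbt
      rw [h st hst t htA, hsttb, if_pos rfl, if_neg hsing, hxor, if_neg (by omega), zero_add]
      have hval : ∀ i ∈ (Finset.range A.length).filter
          (fun i => ¬ m &&& (1 <<< i) = 0 ∧ t ∈ aAdj A i),
          dp m i = ((pvDp A (pvMset A.length m).card (pvMset A.length m) i : ℕ) : Int) := by
        intro i hi
        simp only [Finset.mem_filter, Finset.mem_range] at hi
        obtain ⟨hin, hb, _⟩ := hi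
        have hbi : m.testBit i = true := by
          rcases Bool.eq_false_or_eq_true (m.testBit i) with h1 | h1
          · exact h1
          · exact absurd ((pvBand_eq_zero m i).mpr h1) hb
        rw [h m hm i hin, hbi, if_pos rfl]
        by_cases hms : m = 1 <<< i
        · rw [if_pos hms]
          have : pvMset A.length m = {i} := by rw [hms]; exact pvMset_singleton A.length i hin
          rw [this]
          norm_num [pvDp, Finset.card_singleton]
        · rw [if_neg hms, if_pos (pvXor_form m i hbi).2.2]
      rw [Finset.sum_congr rfl hval, ← Nat.cast_sum, pvDp_insert A m t hm0 hm htA hbt, hmub]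
      rw [if_pos rfl, if_neg hsing, if_pos (by omega)]
  · rw [if_neg hcell, add_zero, h st hst t htA]
    by_cases hb : st.testBit t
    · rw [hb, if_pos rfl, if_pos rfl]
      by_cases hsing : st = 1 <<< t
      · rw [if_pos hsing, if_pos hsing]
      · rw [if_neg hsing, if_neg hsing]
        have hxor : st ^^^ (1 <<< t) ≠ m := by
          intro he
          obtain ⟨h1, h2, _⟩ := pvXor_form st t hb
          refine hcell ⟨?_, ?_⟩
          · rw [← he]; exact h1
          · rw [← he]; exact (pvBand_eq_zero _ t).mpr h2
        have hiff : (st ^^^ (1 <<< t) < m) ↔ (st ^^^ (1 <<< t) < m + 1) := by omega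
        by_cases hlt : st ^^^ (1 <<< t) < m
        · rw [if_pos hlt, if_pos (by omega)]
        · rw [if_neg hlt, if_neg (by omega)]
    · rw [Bool.not_eq_true] at hb
      rw [hb]; simp
lemma pvInv_aDp (A : List Int) : pvInv A (2 ^ A.length) (aDp A) := by
  have main : ∀ k, k ≤ 2 ^ A.length →
      pvInv A k ((List.range k).foldl (aMask A) (aInit A)) := by
    intro k
    induction k with
    | zero => intro _; exact pvInv_init A
    | succ k ih =>
      intro hk
      rw [List.range_succ, List.foldl_append, List.foldl_cons, List.foldl_nil]
      exact pvInv_step A k _ (ih (by omega)) (by omega)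
  exact main _ le_rfl

lemma aDp_full (A : List Int) (i : Nat) (hi : i < A.length) :
    aDp A (2 ^ A.length - 1) i =
      (pvDp A A.length (Finset.range A.length) i : Int) := by
  have hpow : (0:Nat) < 2 ^ A.length := Nat.two_pow_pos A.length
  have hst : 2 ^ A.length - 1 < 2 ^ A.length := by omega
  have hb : (2 ^ A.length - 1).testBit i = true := by
    rw [Nat.testBit_two_pow_sub_one]; simpa using hi
  have h := pvInv_aDp A (2 ^ A.length - 1) hst i hi
  rw [h, hb, if_pos rfl]
  have hmf : pvMset A.length (2 ^ A.length - 1) = Finset.range A.length := pvMset_full A.length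
  by_cases hsing : 2 ^ A.length - 1 = 1 <<< i
  · rw [if_pos hsing]
    -- only possible when A.length = 1 (and i = 0)
    have hn1 : A.length = 1 := by
      by_contra hn
      have h2 : 2 ≤ A.length := by omega
      have ht0 : (2 ^ A.length - 1).testBit 0 = true := by
        rw [Nat.testBit_two_pow_sub_one]; simp; omega
      have ht1 : (2 ^ A.length - 1).testBit 1 = true := by
        rw [Nat.testBit_two_pow_sub_one]; simpa using h2
      rw [hsing, Nat.shiftLeft_eq, one_mul, Nat.testBit_two_pow] at ht0 ht1
      have : i = 0 := by simpa using ht0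
      have : i = 1 := by simpa using ht1
      omega
    have hi0 : i = 0 := by omega
    subst hi0
    rw [hn1]
    norm_num [pvDp, Finset.range_one]
  · rw [if_neg hsing, if_pos, hmf, Finset.card_range]
    calc (2 ^ A.length - 1) ^^^ (1 <<< i) < 2 ^ A.length - 1 := (pvXor_form _ i hb).2.2
      _ < 2 ^ A.length := hst

-- ---- counting: multiplicities ----
lemma pvCnt_pos (A : List Int) (s : Finset ℕ) (v : Int) :
    v ∈ s.image (pvVal A) ↔ 0 < pvCnt A s v := by
  rw [pvCnt, Finset.card_pos]
  constructor
  · rintro h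
    obtain ⟨i, hi, he⟩ := Finset.mem_image.mp h
    exact ⟨i, Finset.mem_filter.mpr ⟨hi, he⟩⟩
  · rintro ⟨i, hi⟩
    obtain ⟨h1, h2⟩ := Finset.mem_filter.mp hi
    exact Finset.mem_image.mpr ⟨i, h1, h2⟩
lemma pvCnt_erase_self (A : List Int) (s : Finset ℕ) (i : Nat) (hi : i ∈ s) :
    pvCnt A (s.erase i) (pvVal A i) = pvCnt A s (pvVal A i) - 1 := by
  rw [pvCnt, pvCnt, Finset.filter_erase]
  exact Finset.card_erase_of_mem (Finset.mem_filter.mpr ⟨hi, rfl⟩)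

lemma pvCnt_erase_of_ne (A : List Int) (s : Finset ℕ) (i : Nat) (v : Int)
    (hv : v ≠ pvVal A i) : pvCnt A (s.erase i) v = pvCnt A s v := by
  rw [pvCnt, pvCnt, Finset.filter_erase, Finset.erase_eq_of_notMem]
  intro hmem
  exact hv (Finset.mem_filter.mp hmem).2.symm

lemma pvFkey (A : List Int) (s : Finset ℕ) (i : Nat) (hi : i ∈ s) :
    pvCnt A s (pvVal A i) * pvF A (s.erase i) = pvF A s := by
  set v0 := pvVal A i with hv0
  set c := pvCnt A s v0 with hc
  have hcpos : 0 < c := by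
    rw [hc]
    exact (pvCnt_pos A s v0).mp (Finset.mem_image.mpr ⟨i, hi, rfl⟩)
  have hv0mem : v0 ∈ s.image (pvVal A) := Finset.mem_image.mpr ⟨i, hi, rfl⟩
  -- counts on the erased set
  have hcnt_ne : ∀ v, v ≠ v0 → pvCnt A (s.erase i) v = pvCnt A s v :=
    fun v hv => pvCnt_erase_of_ne A s i v hv
  have hcnt_eq : pvCnt A (s.erase i) v0 = c - 1 := pvCnt_erase_self A s i hi
  -- the product over the erased set, with the v0 term factored out of F s
  have hFs : pvF A s = (c.factorial) *
      ∏ v ∈ (s.image (pvVal A)).erase v0, (pvCnt A s v).factorial := by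
    rw [pvF, ← Finset.mul_prod_erase _ _ hv0mem]
  have hprod_ne : ∏ v ∈ (s.image (pvVal A)).erase v0, (pvCnt A (s.erase i) v).factorial
      = ∏ v ∈ (s.image (pvVal A)).erase v0, (pvCnt A s v).factorial := by
    apply Finset.prod_congr rfl
    intro v hv
    rw [hcnt_ne v (Finset.ne_of_mem_erase hv)]
  have himg : pvF A (s.erase i) = ((c - 1).factorial) *
      ∏ v ∈ (s.image (pvVal A)).erase v0, (pvCnt A s v).factorial := by
    rw [pvF]
    by_cases h1 : c = 1
    · -- v0 disappears from the image
      have himg1 : (s.erase i).image (pvVal A) = (s.image (pvVal A)).erase v0 := by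
        ext w
        constructor
        · intro hw
          obtain ⟨j, hj, he⟩ := Finset.mem_image.mp hw
          refine Finset.mem_erase.mpr ⟨?_, Finset.mem_image.mpr ⟨j, Finset.mem_of_mem_erase hj, he⟩⟩
          intro hwv0
          have : 0 < pvCnt A (s.erase i) w :=
            (pvCnt_pos A (s.erase i) w).mp (Finset.mem_image.mpr ⟨j, hj, he⟩)
          rw [hwv0, hcnt_eq] at this
          omega
        · intro hw
          obtain ⟨hne, hw2⟩ := Finset.mem_erase.mp hw
          have : 0 < pvCnt A (s.erase i) w := by
            rw [hcnt_ne w hne]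
            exact (pvCnt_pos A s w).mp hw2
          obtain ⟨j, hj⟩ := Finset.card_pos.mp this
          obtain ⟨hj1, hj2⟩ := Finset.mem_filter.mp hj
          exact Finset.mem_image.mpr ⟨j, hj1, hj2⟩
      rw [himg1, hprod_ne, h1]
      norm_num
    · -- v0 stays in the image
      have himg2 : (s.erase i).image (pvVal A) = s.image (pvVal A) := by
        ext w
        constructor
        · intro hw
          obtain ⟨j, hj, he⟩ := Finset.mem_image.mp hw
          exact Finset.mem_image.mpr ⟨j, Finset.mem_of_mem_erase hj, he⟩
        · intro hw
          have : 0 < pvCnt A (s.erase i) w := by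
            by_cases hwv : w = v0
            · rw [hwv, hcnt_eq]; omega
            · rw [hcnt_ne w hwv]; exact (pvCnt_pos A s w).mp hw
          obtain ⟨j, hj⟩ := Finset.card_pos.mp this
          obtain ⟨hj1, hj2⟩ := Finset.mem_filter.mp hj
          exact Finset.mem_image.mpr ⟨j, hj1, hj2⟩
      rw [himg2, ← Finset.mul_prod_erase _ _ hv0mem, hcnt_eq, hprod_ne]
  rw [himg, hFs, ← mul_assoc, Nat.mul_factorial_pred (by omega : c ≠ 0)]

lemma pvMval_toFinset (A : List Int) (s : Finset ℕ) :
    (pvMval A s).toFinset = s.image (pvVal A) := by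
  rw [pvMval, Multiset.toFinset_map, Finset.val_toFinset]
lemma pvMval_count (A : List Int) (s : Finset ℕ) (v : Int) :
    (pvMval A s).count v = pvCnt A s v := by
  rw [pvMval, Multiset.count_map, pvCnt, Finset.card_def, Finset.filter_val]
  congr 1
  apply Multiset.filter_congr
  intro x _
  exact eq_comm

lemma pvMval_erase (A : List Int) (s : Finset ℕ) (i : Nat) (hi : i ∈ s) :
    pvMval A (s.erase i) = (pvMval A s).erase (pvVal A i) := by
  ext w
  rw [pvMval_count]
  by_cases hw : w = pvVal A i
  · subst hw
    rw [Multiset.count_erase_self, pvMval_count, pvCnt_erase_self A s i hi]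
  · rw [Multiset.count_erase_of_ne hw, pvMval_count, pvCnt_erase_of_ne A s i w hw]
lemma pvMval_range (A : List Int) : pvMval A (Finset.range A.length) = (A : Multiset Int) := by
  rw [pvMval, Finset.range_val]
  have h1 : (Multiset.range A.length) = ((List.range A.length : List ℕ) : Multiset ℕ) := rfl
  rw [h1, Multiset.map_coe]
  congr 1
  apply List.ext_getElem
  · simp
  · intro k h1 h2
    simp only [List.getElem_map, List.getElem_range]
    rw [pvVal, List.getD_eq_getElem A 0 (by simpa using h1)]

-- ---- the main orbit-counting identity ----
lemma pvMain (A : List Int) :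
    ∀ (k : ℕ) (s : Finset ℕ) (φ : Int → Bool), s.card = k →
      ∑ i ∈ s.filter (fun i => φ (pvVal A i)), pvDp A k s i
      = pvF A s *
          ∑ v ∈ (pvMval A s).toFinset.filter (fun v => φ v), pvH (k - 1) ((pvMval A s).erase v) v := by
  intro k
  induction k with
  | zero =>
    intro s φ hs
    have : s = ∅ := Finset.card_eq_zero.mp hs
    subst this
    simp [pvMval]
  | succ k ih =>
    intro s φ hs
    simp only [Nat.add_sub_cancel]
    -- (★): each endpoint's dp count factors through the value multiset
    have hstar : ∀ i ∈ s, pvDp A (k+1) s i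
        = pvF A (s.erase i) * pvH k ((pvMval A s).erase (pvVal A i)) (pvVal A i) := by
      intro i hi
      by_cases hsing : s = {i}
      · have hk0 : k = 0 := by rw [hsing] at hs; simpa using hs
        subst hk0
        rw [show pvDp A 1 s i = if s = {i} then 1 else 0 from by simp [pvDp, hsing], if_pos hsing]
        rw [show pvH 0 ((pvMval A s).erase (pvVal A i)) (pvVal A i) = 1 from rfl]
        rw [hsing, Finset.erase_singleton]
        simp [pvF]
      · have hk1 : 1 ≤ k := by
          rcases Nat.lt_or_ge k 1 with h | h
          · interval_cases k
            obtain ⟨a, ha⟩ := Finset.card_eq_one.mp hs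
            rw [ha, Finset.mem_singleton] at hi
            exact absurd (by rw [ha, hi]) hsing
          · exact h
        obtain ⟨k', rfl⟩ : ∃ k', k = k' + 1 := ⟨k - 1, by omega⟩
        rw [show pvDp A (k'+1+1) s i = if s = {i} then 1 else
            ∑ l ∈ (s.erase i).filter (fun l => pySq (pvVal A l + pvVal A i)),
              pvDp A (k'+1) (s.erase i) l from rfl, if_neg hsing]
        have hcard : (s.erase i).card = k' + 1 := by
          rw [Finset.card_erase_of_mem hi, hs]
          omega
        have hih := ih (s.erase i) (fun w => pySq (w + pvVal A i)) hcard
        simp only [Nat.add_sub_cancel] at hih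
        rw [hih, pvMval_erase A s i hi]
        congr 1
        rw [show pvH (k'+1) ((pvMval A s).erase (pvVal A i)) (pvVal A i)
            = ∑ v ∈ (((pvMval A s).erase (pvVal A i)).toFinset).filter
                (fun v => pySq (pvVal A i + v)),
              pvH k' (((pvMval A s).erase (pvVal A i)).erase v) v from rfl]
        apply Finset.sum_congr
        · apply Finset.filter_congr
          intro v _
          rw [pySq_comm]
        · intro v _; rfl
    -- fiberwise grouping over the distinct values
    have hchain : ∑ i ∈ s.filter (fun i => φ (pvVal A i)), pvDp A (k+1) s i
        = ∑ i ∈ s.filter (fun i => φ (pvVal A i)),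
            pvF A (s.erase i) * pvH k ((pvMval A s).erase (pvVal A i)) (pvVal A i) :=
      Finset.sum_congr rfl (fun i hi => hstar i (Finset.mem_filter.mp hi).1)
    rw [hchain, pvMval_toFinset]
    rw [← Finset.sum_fiberwise_of_maps_to (g := fun i => pvVal A i)
      (t := (s.image (pvVal A)).filter (fun v => φ v))
      (fun i hi => by
        obtain ⟨h1, h2⟩ := Finset.mem_filter.mp hi
        exact Finset.mem_filter.mpr ⟨Finset.mem_image_of_mem _ h1, h2⟩)]
    rw [Finset.mul_sum]
    apply Finset.sum_congr rfl
    intro v hv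
    obtain ⟨hvimg, hvphi⟩ := Finset.mem_filter.mp hv
    have hfib : (s.filter (fun i => φ (pvVal A i))).filter (fun i => pvVal A i = v)
        = s.filter (fun i => pvVal A i = v) := by
      rw [Finset.filter_filter]
      apply Finset.filter_congr
      intro i _
      constructor
      · rintro ⟨_, h2⟩; exact h2
      · rintro h2; exact ⟨by rw [h2]; exact hvphi, h2⟩
    rw [hfib]
    have hsummand : ∀ i ∈ s.filter (fun i => pvVal A i = v),
        pvF A (s.erase i) * pvH k ((pvMval A s).erase (pvVal A i)) (pvVal A i)
        = pvF A (s.erase i) * pvH k ((pvMval A s).erase v) v := by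
      intro i hi
      rw [(Finset.mem_filter.mp hi).2]
    rw [Finset.sum_congr rfl hsummand]
    have hcpos : 0 < pvCnt A s v := (pvCnt_pos A s v).mp hvimg
    apply Nat.eq_of_mul_eq_mul_left hcpos
    rw [Finset.mul_sum]
    rw [Finset.sum_congr rfl (fun i hi => by
      obtain ⟨his, hiv⟩ := Finset.mem_filter.mp hi
      rw [← mul_assoc,
        show pvCnt A s v * pvF A (s.erase i) = pvF A s from by rw [← hiv]; exact pvFkey A s i his])]
    rw [Finset.sum_const, smul_eq_mul,
      show Finset.card {i ∈ s | pvVal A i = v} = pvCnt A s v from rfl]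

-- ---- B-side bridge ----
lemma bDfs_eq (k : ℕ) :
    ∀ (d : PySem.Dict Int Int) (m : Multiset Int) (p : Int), d.keys.Nodup →
      (∀ v, d.getD v 0 = (m.count v : Int)) → (∀ v ∈ m, v ∈ d.keys) →
      bDfs d p k = (pvH k m p : Int) := by
  induction k with
  | zero => intros; rfl
  | succ k ih =>
    intro d m p hnd hc hk
    rw [show bDfs d p (k+1) = d.keys.foldl (fun total v =>
      if 0 < d.getD v 0 ∧ pySq (p + v) then
        total + bDfs (d.modify v 0 (· - 1)) v k
      else total) 0 from rfl]
    have hfun : (fun (total : Int) v =>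
        if 0 < d.getD v 0 ∧ pySq (p + v) then
          total + bDfs (d.modify v 0 (· - 1)) v k
        else total)
        = (fun (total : Int) v => total +
          (if 0 < d.getD v 0 ∧ pySq (p + v) then bDfs (d.modify v 0 (· - 1)) v k else 0)) := by
      funext total v
      by_cases hcond : 0 < d.getD v 0 ∧ pySq (p + v)
      · rw [if_pos hcond, if_pos hcond]
      · rw [if_neg hcond, if_neg hcond, add_zero]
    rw [hfun, PySem.List.foldl_add, zero_add, ← List.sum_toFinset _ hnd,
      ← Finset.sum_filter]
    have hset : d.keys.toFinset.filter (fun v => 0 < d.getD v 0 ∧ pySq (p + v))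
        = m.toFinset.filter (fun v => pySq (p + v)) := by
      ext v
      simp only [Finset.mem_filter, List.mem_toFinset, Multiset.mem_toFinset]
      constructor
      · rintro ⟨h1, h2, h3⟩
        rw [hc v] at h2
        refine ⟨?_, h3⟩
        rw [← Multiset.count_pos]
        exact_mod_cast h2
      · rintro ⟨h1, h2⟩
        refine ⟨hk v h1, ?_, h2⟩
        rw [hc v]
        exact_mod_cast Multiset.count_pos.mpr h1
    rw [hset]
    have hterm : ∀ v ∈ m.toFinset.filter (fun v => pySq (p + v)),
        bDfs (d.modify v 0 (· - 1)) v k = ((pvH k (m.erase v) v : ℕ) : Int) := by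
      intro v hv
      obtain ⟨hvm, _⟩ := Finset.mem_filter.mp hv
      rw [Multiset.mem_toFinset] at hvm
      apply ih
      · rw [PySem.Dict.keys_modify]
        exact PySem.Dict.nodup_keys_insert d v _ hnd
      · intro w
        rw [PySem.Dict.getD_modify]
        by_cases hwv : w = v
        · subst hwv
          rw [if_pos rfl, hc w, Multiset.count_erase_self]
          have : 1 ≤ m.count w := Multiset.count_pos.mpr hvm
          push_cast [this]
          omega
        · rw [if_neg hwv, hc w, Multiset.count_erase_of_ne hwv]
      · intro w hw
        rw [PySem.Dict.keys_modify]
        exact (PySem.Dict.mem_keys_insert ..).mpr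
          (Or.inr (hk w (Multiset.mem_of_mem_erase hw)))
    rw [Finset.sum_congr rfl hterm, ← Nat.cast_sum]
    rfl

lemma alt_eq (A : List Int) :
    numSquarefulPerms_alt A =
      ((∑ v ∈ (A : Multiset Int).toFinset,
        pvH (A.length - 1) ((A : Multiset Int).erase v) v : ℕ) : Int) := by
  rw [show numSquarefulPerms_alt A = (PySem.Dict.counter A).keys.foldl
    (fun ans v => ans + bDfs ((PySem.Dict.counter A).modify v 0 (· - 1)) v (A.length - 1)) 0
    from rfl]
  rw [PySem.List.foldl_add, zero_add]
  have hkeys : (PySem.Dict.counter A).keys = PySem.Set.ofList A := PySem.Dict.keys_counter A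
  have hnd : (PySem.Dict.counter A).keys.Nodup := PySem.Dict.nodup_keys_counter A
  rw [← List.sum_toFinset _ hnd]
  have hset : (PySem.Dict.counter A).keys.toFinset = (A : Multiset Int).toFinset := by
    ext v
    rw [hkeys, List.mem_toFinset, PySem.Set.mem_ofList, Multiset.mem_toFinset, Multiset.mem_coe]
  rw [hset]
  have hterm : ∀ v ∈ (A : Multiset Int).toFinset,
      bDfs ((PySem.Dict.counter A).modify v 0 (· - 1)) v (A.length - 1)
        = ((pvH (A.length - 1) ((A : Multiset Int).erase v) v : ℕ) : Int) := by
    intro v hv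
    rw [Multiset.mem_toFinset, Multiset.mem_coe] at hv
    apply bDfs_eq
    · rw [PySem.Dict.keys_modify]
      exact PySem.Dict.nodup_keys_insert _ v _ hnd
    · intro w
      rw [PySem.Dict.getD_modify]
      by_cases hwv : w = v
      · subst hwv
        rw [if_pos rfl, PySem.Dict.getD_counter, Multiset.count_erase_self, Multiset.coe_count]
        have : 1 ≤ A.count w := List.count_pos_iff.mpr hv
        push_cast [this]
        omega
      · rw [if_neg hwv, PySem.Dict.getD_counter, Multiset.count_erase_of_ne hwv,
          Multiset.coe_count]
    · intro w hw
      rw [PySem.Dict.keys_modify]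
      refine (PySem.Dict.mem_keys_insert ..).mpr (Or.inr ?_)
      rw [hkeys, PySem.Set.mem_ofList]
      have : w ∈ (A : Multiset Int) := Multiset.mem_of_mem_erase hw
      rwa [Multiset.mem_coe] at this
  rw [Finset.sum_congr rfl hterm, ← Nat.cast_sum]

-- ---- final assembly ----
lemma aFac_lookup (c : ℕ) (hc : c ≤ 19) :
    PySem.List.pyGetD aFac (c : Int) 0 = (c.factorial : Int) := by
  have h : aFac = [1, 1, 2, 6, 24, 120, 720, 5040, 40320, 362880, 3628800, 39916800,
      479001600, 6227020800, 87178291200, 1307674368000, 20922789888000, 355687428096000,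
      6402373705728000, 121645100408832000] := by decide
  rw [h, PySem.List.pyGetD_natCast]
  interval_cases c <;> decide

-- the division loop divides the product of factorials back out, factor by factor
lemma pvDivFold (A : List Int) (B : ℕ) :
    ∀ (l : List Int), (∀ v ∈ l, 1 ≤ A.count v ∧ A.count v ≤ 19) →
      ((l.map (fun k => (k, (A.count k : Int)))).foldl
        (fun ans kc => PySem.Int.floordiv ans (PySem.List.pyGetD aFac kc.2 0))
        (((l.map (fun k => (A.count k).factorial)).prod * B : ℕ) : Int))
      = (B : Int) := by
  intro l
  induction l with
  | nil => intro _; simp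
  | cons v t ih =>
    intro hb
    obtain ⟨h1, h2⟩ := hb v List.mem_cons_self
    simp only [List.map_cons, List.foldl_cons, List.prod_cons]
    rw [aFac_lookup (A.count v) h2]
    have hfacpos : (0 : Int) < ((A.count v).factorial : Int) := by
      exact_mod_cast (A.count v).factorial_pos
    rw [PySem.Int.floordiv_eq_ediv_of_pos hfacpos]
    have hdiv : (((((A.count v).factorial * ((t.map (fun k => (A.count k).factorial)).prod * B))
        : ℕ) : Int)) / ((A.count v).factorial : Int)
        = (((t.map (fun k => (A.count k).factorial)).prod * B : ℕ) : Int) := by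
      push_cast
      rw [Int.mul_ediv_cancel_left]
      exact_mod_cast (A.count v).factorial_pos.ne'
    rw [show ((A.count v).factorial * (t.map (fun k => (A.count k).factorial)).prod * B : ℕ)
        = ((A.count v).factorial * ((t.map (fun k => (A.count k).factorial)).prod * B) : ℕ)
        from by ring, hdiv]
    exact ih (fun w hw => hb w (List.mem_cons_of_mem _ hw))

theorem numSquarefulPerms_spec : Claim_equal_numSquarefulPerms := by
  unfold Claim_equal_numSquarefulPerms
  intro A _ hpre
  unfold Spec_numSquarefulPerms
  obtain ⟨_, hcnt⟩ := hpre
  -- the dp sum counts all squareful index orderings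
  have hans : (List.range A.length).foldl (fun a i => a + aDp A (2 ^ A.length - 1) i) 0
      = ((∑ i ∈ Finset.range A.length, pvDp A A.length (Finset.range A.length) i : ℕ) : Int) := by
    rw [PySem.List.foldl_add, zero_add]
    have h1 : ((List.range A.length).map (fun i => aDp A (2 ^ A.length - 1) i)).sum
        = ∑ i ∈ Finset.range A.length, aDp A (2 ^ A.length - 1) i := rfl
    rw [h1, Finset.sum_congr rfl (fun i hi => aDp_full A i (Finset.mem_range.mp hi)),
      ← Nat.cast_sum]
  -- the orbit-counting identity, with no gate on the first value
  have hmain := pvMain A A.length (Finset.range A.length) (fun _ => true) (Finset.card_range _)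
  rw [pvMval_range] at hmain
  simp at hmain
  -- unfold the port
  rw [show numSquarefulPerms A = (PySem.Dict.counter A).items.foldl
      (fun ans kc => PySem.Int.floordiv ans (PySem.List.pyGetD aFac kc.2 0))
      ((List.range A.length).foldl (fun a i => a + aDp A (2 ^ A.length - 1) i) 0) from rfl]
  rw [hans, hmain]
  -- the leading factor is the product of the factorials stored in the Counter
  have hFprod : pvF A (Finset.range A.length)
      = ((PySem.Set.ofList A : List Int).map (fun k => (A.count k).factorial)).prod := by
    rw [pvF]
    have himg : (Finset.range A.length).image (pvVal A)
        = (PySem.Set.ofList A : List Int).toFinset := by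
      rw [← pvMval_toFinset, pvMval_range]
      ext v
      rw [Multiset.mem_toFinset, Multiset.mem_coe, List.mem_toFinset, PySem.Set.mem_ofList]
    rw [himg, Finset.prod_congr rfl (fun v hv => by
      rw [show pvCnt A (Finset.range A.length) v = A.count v from by
        rw [← pvMval_count, pvMval_range, Multiset.coe_count]])]
    exact List.prod_toFinset _ (PySem.Set.nodup_ofList A)
  rw [hFprod, PySem.Dict.items_counter]
  rw [pvDivFold A _ (PySem.Set.ofList A) (fun v hv => by
    rw [PySem.Set.mem_ofList] at hv
    exact ⟨List.count_pos_iff.mpr hv, hcnt v hv⟩)]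
  exact (alt_eq A).symm
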